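-- pv_equiv track=rewrite | github.com/melobyrro/Dev | home-server/docker/paperless/classify_document.py | tag_allowed
-- ===== SOURCE A (Python) =====
-- from typing import Any, Dict, Iterable, List, Optional, Tuple
--
-- def tag_allowed(tag: str, whitelist: Iterable[str]) -> bool:
--     for allowed in whitelist:
--         if allowed.endswith("*"):
--             if tag.startswith(allowed[:-1]):
--                 return True
--         elif tag == allowed:
--             return True
--     return False
-- ===== SOURCE B (Python) =====
-- def tag_allowed(tag, whitelist):
--     exact = set()
--     prefixes = []
--     for allowed in whitelist:
--         if allowed.endswith("*"):
--             prefixes.append(allowed[:-1])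
--         else:
--             exact.add(allowed)
--     return tag in exact or any(tag.startswith(p) for p in prefixes)
-- ===== Notes on version B (the rewrite author's own statement) =====
-- stated objective: alternative
-- what changed: One preprocessing pass partitions the whitelist into an exact-match set and a list of star-stripped prefixes; the result is then a set-membership test plus a prefix scan, instead of A's single branching loop with early returns.
import Mathlib
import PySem

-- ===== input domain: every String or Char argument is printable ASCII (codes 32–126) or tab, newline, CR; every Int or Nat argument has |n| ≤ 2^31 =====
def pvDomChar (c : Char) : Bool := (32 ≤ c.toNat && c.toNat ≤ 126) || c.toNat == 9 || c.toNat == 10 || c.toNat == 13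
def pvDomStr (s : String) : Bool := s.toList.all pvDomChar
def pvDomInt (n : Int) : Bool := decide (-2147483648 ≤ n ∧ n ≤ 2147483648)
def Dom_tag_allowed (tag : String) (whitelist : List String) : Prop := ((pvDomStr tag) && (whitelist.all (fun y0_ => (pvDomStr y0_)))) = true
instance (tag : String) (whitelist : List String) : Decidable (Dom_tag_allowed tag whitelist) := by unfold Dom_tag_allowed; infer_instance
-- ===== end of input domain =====

-- ===== PORT A =====
-- B preprocesses the whitelist into an exact-match set plus a prefix list (alternative decomposition, same cost); A = B proved on Dom.
def tagAllowedGo (tag : String) : List String → Bool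
  | [] => false
  | allowed :: rest =>
    if PySem.Str.endswith allowed "*" then
      if PySem.Str.startswith tag (PySem.Str.slice allowed none (some (-1))) then true
      else tagAllowedGo tag rest
    else if tag == allowed then true
    else tagAllowedGo tag rest

def tag_allowed (tag : String) (whitelist : List String) : Bool :=
  tagAllowedGo tag whitelist

-- ===== PORT B =====
def tagAllowedStep (acc : PySem.Set String × List String) (allowed : String) :
    PySem.Set String × List String :=
  if PySem.Str.endswith allowed "*" then
    (acc.1, acc.2 ++ [PySem.Str.slice allowed none (some (-1))])
  else
    (PySem.Set.add acc.1 allowed, acc.2)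

def tag_allowed_alt (tag : String) (whitelist : List String) : Bool :=
  let p := whitelist.foldl tagAllowedStep (PySem.Set.empty, [])
  p.1.contains tag || p.2.any (fun pre => PySem.Str.startswith tag pre)

-- ===== PRECONDITION & SPEC =====
def Spec_tag_allowed (tag : String) (whitelist : List String) (out : Bool) : Prop := out = tag_allowed_alt tag whitelist
instance (tag : String) (whitelist : List String) (out : Bool) : Decidable (Spec_tag_allowed tag whitelist out) := by unfold Spec_tag_allowed; infer_instance

-- ===== CLAIM (what is proved, stated in full; the proofs are below) =====
def Claim_equal_tag_allowed : Prop := ∀ (tag : String) (whitelist : List String), Dom_tag_allowed tag whitelist → Spec_tag_allowed tag whitelist (tag_allowed tag whitelist)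

-- ===== LEMMAS AND PROOFS =====
theorem contains_add (s : PySem.Set String) (a tag : String) :
    (PySem.Set.add s a).contains tag = (s.contains tag || tag == a) := by
  by_cases h : a ∈ s
  · simp [PySem.Set.add, h, beq_iff_eq]
    intro htag; exact htag ▸ h
  · by_cases he : tag = a <;> simp [PySem.Set.add, h, he]

theorem tagAllowed_bool_aux1 (x y g b : Bool) :
    ((x || (y || (b || false))) || g) = ((x || y) || (if b = true then true else g)) := by
  cases b <;> cases g <;> cases x <;> cases y <;> rfl

theorem tagAllowed_bool_aux2 (x y g e : Bool) :
    (((x || e) || y) || g) = ((x || y) || (if e = true then true else g)) := by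
  cases e <;> cases g <;> cases x <;> cases y <;> rfl

theorem tagAllowed_fold_inv (tag : String) (ws : List String)
    (acc : PySem.Set String × List String) :
    ((ws.foldl tagAllowedStep acc).1.contains tag
      || (ws.foldl tagAllowedStep acc).2.any (fun pre => PySem.Str.startswith tag pre))
    = (acc.1.contains tag || acc.2.any (fun pre => PySem.Str.startswith tag pre)
        || tagAllowedGo tag ws) := by
  induction ws generalizing acc with
  | nil => simp only [List.foldl_nil, tagAllowedGo, Bool.or_false]
  | cons a rest ih =>
    simp only [List.foldl_cons, tagAllowedGo]
    by_cases h : PySem.Str.endswith a "*" = true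
    · rw [show tagAllowedStep acc a
          = (acc.1, acc.2 ++ [PySem.Str.slice a none (some (-1))]) from by
            unfold tagAllowedStep; rw [if_pos h], ih, if_pos h]
      simp only [List.any_append, List.any_cons, List.any_nil]
      exact tagAllowed_bool_aux1 _ _ _ _
    · rw [show tagAllowedStep acc a = (PySem.Set.add acc.1 a, acc.2) from by
            unfold tagAllowedStep; rw [if_neg h], ih, contains_add, if_neg h]
      exact tagAllowed_bool_aux2 _ _ _ _

-- ===== VERDICT (by name: the statement is the Claim_ definition above) =====
theorem tag_allowed_spec : Claim_equal_tag_allowed := by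
  intro tag whitelist _
  unfold Spec_tag_allowed tag_allowed tag_allowed_alt
  rw [tagAllowed_fold_inv]
  simp [PySem.Set.empty]
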